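-- pv_equiv track=rewrite | github.com/WernerLars/Bachelorprojekt | Autoencoder/helper_files/AutoEncoderHelper.py | determine_layer_sizes_from_weights
-- ===== SOURCE A (Python) =====
-- def determine_layer_sizes_from_weights(weights_as_list: list) -> list:
--     """
--         Determines number of Neurons per layer in list of weights
--     :param weights_as_list: list that contains the weights of the model
--     :return: list which contains starting from the first layer how much neurons the layers contain
--     """
--     list_of_new_layer_sizes = []
--     number_of_layers_in_new_model = len(weights_as_list)
--     layer_number_in_list = list(range(number_of_layers_in_new_model))
--
--     for (layer_Number, weights) in zip(layer_number_in_list, weights_as_list):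
--
--         not_first_or_last_layer = not (
--                 layer_Number == layer_number_in_list[0] | layer_Number == layer_number_in_list[-1])
--
--         if not_first_or_last_layer:
--             for array in weights[:1]:
--                 list_of_new_layer_sizes.append(len(array))
--         else:
--             for array in weights:
--                 list_of_new_layer_sizes.append(len(array))
--
--     return list_of_new_layer_sizes
-- ===== SOURCE B (Python) =====
-- def determine_layer_sizes_from_weights(weights_as_list: list) -> list:
--     """
--         Determines number of Neurons per layer in list of weights
--     :param weights_as_list: list that contains the weights of the model
--     :return: list which contains starting from the first layer how much neurons the layers contain
--     """
--     def sizes(layers):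
--         head, *tail = layers
--         if not tail:
--             return [len(row) for row in head]
--         rest = sizes(tail)
--         return [len(head[0])] + rest if head else rest
--
--     return sizes(weights_as_list) if weights_as_list else []
-- ===== Notes on version B (the rewrite author's own statement) =====
-- stated objective: alternative
-- what changed: Replaces A's index-zipped single-pass loop with its obfuscated bitwise-or/chained-comparison position test by structural recursion on the list of layers: the one-layer case (the last layer, expanded into all row lengths) is the base case, and each earlier layer conses its first row's length (if non-empty) onto the recursive result - no indices, no slicing, output built back-to-front by consing.
import Mathlib
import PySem

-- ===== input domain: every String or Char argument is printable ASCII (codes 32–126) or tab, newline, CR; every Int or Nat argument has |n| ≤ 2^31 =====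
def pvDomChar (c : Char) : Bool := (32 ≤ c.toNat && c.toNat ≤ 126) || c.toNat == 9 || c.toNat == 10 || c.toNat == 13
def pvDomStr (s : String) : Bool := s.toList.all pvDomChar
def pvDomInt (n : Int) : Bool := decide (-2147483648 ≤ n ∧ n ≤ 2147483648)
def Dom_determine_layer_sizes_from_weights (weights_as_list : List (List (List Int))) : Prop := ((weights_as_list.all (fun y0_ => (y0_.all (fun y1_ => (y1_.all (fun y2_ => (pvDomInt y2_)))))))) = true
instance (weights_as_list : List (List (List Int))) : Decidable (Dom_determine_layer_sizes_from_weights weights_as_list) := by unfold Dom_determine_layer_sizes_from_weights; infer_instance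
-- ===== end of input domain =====

-- B replaces A's index-zipped loop with its obfuscated position test by structural recursion
-- on the layer list (last layer = base case, earlier layers cons onto the recursive result);
-- objective: an alternative decomposition of the same cost.

-- ===== PORT A =====
def determine_layer_sizes_from_weights (weights_as_list : List (List (List Int))) : List Int :=
  let number_of_layers_in_new_model := weights_as_list.length
  let layer_number_in_list := PySem.List.pyRange 0 (number_of_layers_in_new_model : Int) 1
  (layer_number_in_list.zip weights_as_list).foldl
    (fun list_of_new_layer_sizes p =>
      let layer_Number := p.1
      let weights := p.2
      -- Python: not (layer_Number == layer_number_in_list[0] | layer_Number == layer_number_in_list[-1])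
      -- which is the CHAINED comparison  layer_Number == (first | layer_Number) == last
      let not_first_or_last_layer :=
        !(layer_Number == PySem.Int.bor (PySem.List.pyGetD layer_number_in_list 0 0) layer_Number
          && PySem.Int.bor (PySem.List.pyGetD layer_number_in_list 0 0) layer_Number
             == PySem.List.pyGetD layer_number_in_list (-1) 0)
      if not_first_or_last_layer then
        list_of_new_layer_sizes ++ (PySem.List.slice weights none (some 1)).map (fun array => (array.length : Int))
      else
        list_of_new_layer_sizes ++ weights.map (fun array => (array.length : Int)))
    []

-- ===== PORT B =====
-- Source B's inner recursive helper 'sizes' (its Python is only ever called on a non-empty list;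
-- the [] equation is the vacuous totalisation of the pattern match)
def pvSizes : List (List (List Int)) → List Int
  | [] => []
  | [head] => head.map (fun row => (row.length : Int))
  | head :: tail@(_ :: _) =>
    let rest := pvSizes tail
    match head with
    | r :: _ => (r.length : Int) :: rest
    | [] => rest

def determine_layer_sizes_from_weights_alt (weights_as_list : List (List (List Int))) : List Int :=
  match weights_as_list with
  | [] => []
  | l => pvSizes l

-- ===== PRECONDITION & SPEC =====
def Spec_determine_layer_sizes_from_weights (weights_as_list : List (List (List Int))) (out : List Int) : Prop := out = determine_layer_sizes_from_weights_alt weights_as_list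
instance (weights_as_list : List (List (List Int))) (out : List Int) : Decidable (Spec_determine_layer_sizes_from_weights weights_as_list out) := by unfold Spec_determine_layer_sizes_from_weights; infer_instance

-- ===== CLAIM (what is proved, stated in full; the proofs are below) =====
def Claim_equal_determine_layer_sizes_from_weights : Prop := ∀ (weights_as_list : List (List (List Int))), Dom_determine_layer_sizes_from_weights weights_as_list → Spec_determine_layer_sizes_from_weights weights_as_list (determine_layer_sizes_from_weights weights_as_list)

-- ===== LEMMAS AND PROOFS =====

-- first-row entry of a layer (canonical-form helper for the proofs)
def pvHead (w : List (List Int)) : Option Int :=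
  match w with
  | [] => none
  | r :: _ => some ((r.length : Int))

-- B's recursion computes the canonical form: one entry per non-empty earlier layer, then the last layer expanded
lemma pvSizes_eq (ws : List (List (List Int))) (hw : ws ≠ []) :
    pvSizes ws = ws.dropLast.filterMap pvHead ++ (ws.getLast hw).map (fun array => (array.length : Int)) := by
  induction ws with
  | nil => exact absurd rfl hw
  | cons x rest ih =>
    cases rest with
    | nil => simp [pvSizes]
    | cons y t =>
      have h := ih (by simp)
      cases x <;> simp [pvSizes, h, pvHead]

-- the loop body of A after the obfuscated test is reduced to "index = last"
lemma pv_loop_eq (ws : List (List (List Int))) (hw : ws ≠ []) (last : Int) :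
    ∀ (a : Int) (acc : List Int), last = a + ws.length - 1 →
    ((PySem.List.pyRange a (a + ws.length) 1).zip ws).foldl
      (fun acc p =>
        if (p.1 == last) = true then acc ++ p.2.map (fun array => (array.length : Int))
        else acc ++ (p.2.take 1).map (fun array => (array.length : Int))) acc
    = acc ++ ws.dropLast.filterMap pvHead ++ (ws.getLast hw).map (fun array => (array.length : Int)) := by
  induction ws with
  | nil => exact absurd rfl hw
  | cons x rest ih =>
    intro a acc hlast
    rw [PySem.List.pyRange_one_cons (by simp)]
    cases rest with
    | nil =>
      simp at hlast
      simp [List.foldl, hlast]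
    | cons y t =>
      have hne : (a == last) = false := by
        rw [beq_eq_false_iff_ne]
        simp only [List.length_cons] at hlast
        push_cast at hlast
        omega
      have harg : a + ((x :: y :: t).length : Int) = (a + 1) + ((y :: t).length : Int) := by
        simp; ring
      rw [harg]
      simp only [List.zip_cons_cons, List.foldl_cons, hne, if_neg Bool.false_ne_true]
      rw [ih (by simp) (a + 1) _ (by simp at hlast ⊢; omega)]
      cases x <;> simp [pvHead]

-- ===== VERDICT (by name: the statement is the Claim_ definition above) =====
theorem determine_layer_sizes_from_weights_spec : Claim_equal_determine_layer_sizes_from_weights := by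
  intro ws _
  unfold Spec_determine_layer_sizes_from_weights determine_layer_sizes_from_weights
    determine_layer_sizes_from_weights_alt
  cases ws with
  | nil => simp [PySem.List.pyRange]
  | cons x rest =>
    have hw : (x :: rest : List (List (List Int))) ≠ [] := by simp
    have hn : (0 : Int) < ((x :: rest).length : Int) := by simp
    have hfirst : PySem.List.pyGetD (PySem.List.pyRange 0 ((x :: rest).length : Int) 1) 0 0 = 0 := by
      rw [PySem.List.pyRange_one_cons hn, PySem.List.pyGetD_zero_cons]
    have hcast : ((x :: rest).length : Int) = (rest.length : Int) + 1 := by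
      push_cast [List.length_cons]; ring
    have hlastidx : PySem.List.pyGetD (PySem.List.pyRange 0 ((x :: rest).length : Int) 1) (-1) 0
        = ((x :: rest).length : Int) - 1 := by
      rw [hcast, PySem.List.pyRange_one_succ_right (Int.natCast_nonneg rest.length),
        PySem.List.pyGetD_neg_one_append_singleton]
      ring
    simp only [hfirst, hlastidx]
    have hbody : (fun (acc : List Int) (p : Int × List (List Int)) =>
        let layer_Number := p.1
        let weights := p.2
        let not_first_or_last_layer :=
          !(layer_Number == PySem.Int.bor 0 layer_Number
            && PySem.Int.bor 0 layer_Number == ((x :: rest).length : Int) - 1)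
        if not_first_or_last_layer then
          acc ++ (PySem.List.slice weights none (some 1)).map (fun array => (array.length : Int))
        else
          acc ++ weights.map (fun array => (array.length : Int)))
      = (fun acc p =>
        if (p.1 == ((x :: rest).length : Int) - 1) = true then
          acc ++ p.2.map (fun array => (array.length : Int))
        else acc ++ (p.2.take 1).map (fun array => (array.length : Int))) := by
      funext acc p
      have hbor : PySem.Int.bor 0 p.1 = p.1 := by
        rw [PySem.Int.bor_comm, PySem.Int.bor_zero]
      have hsl : PySem.List.slice p.2 none (some 1) = p.2.take 1 := by
        have := PySem.List.slice_to_natCast (xs := p.2) (b := 1)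
        simpa using this
      simp only [hbor, beq_self_eq_true, Bool.true_and, hsl]
      rcases Bool.eq_false_or_eq_true (p.1 == ((x :: rest).length : Int) - 1) with hb | hb <;>
        rw [hb] <;> simp
    rw [hbody]
    have := pv_loop_eq (x :: rest) hw (((x :: rest).length : Int) - 1) 0 [] (by ring)
    simp only [zero_add] at this
    rw [this, pvSizes_eq (x :: rest) hw]
    simp
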